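-- pv_equiv track=rewrite | github.com/Bouken1106/market_data_analyzer | app/market_session.py | infer_country_from_symbol
-- ===== SOURCE A (Python) =====
-- def infer_country_from_symbol(symbol: str) -> str | None:
--     suffix_map: list[tuple[str, str]] = [
--         (".T", "JAPAN"),
--         (".HK", "HONG KONG"),
--         (".L", "UNITED KINGDOM"),
--         (".PA", "FRANCE"),
--         (".F", "GERMANY"),
--         (".DE", "GERMANY"),
--         (".TO", "CANADA"),
--         (".AX", "AUSTRALIA"),
--         (".NS", "INDIA"),
--         (".BO", "INDIA"),
--         (".SS", "CHINA"),
--         (".SZ", "CHINA"),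
--         (".KS", "SOUTH KOREA"),
--         (".KQ", "SOUTH KOREA"),
--         (".TW", "TAIWAN"),
--         (".SI", "SINGAPORE"),
--     ]
--     symbol_upper = symbol.upper()
--     for suffix, country in suffix_map:
--         if symbol_upper.endswith(suffix):
--             return country
--     return None
-- ===== SOURCE B (Python) =====
-- def _country_of_exchange(code: str) -> str | None:
--     # bare exchange code (no dot), already uppercased
--     if code == "T":
--         return "JAPAN"
--     elif code == "HK":
--         return "HONG KONG"
--     elif code == "L":
--         return "UNITED KINGDOM"
--     elif code == "PA":
--         return "FRANCE"
--     elif code == "F":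
--         return "GERMANY"
--     elif code == "DE":
--         return "GERMANY"
--     elif code == "TO":
--         return "CANADA"
--     elif code == "AX":
--         return "AUSTRALIA"
--     elif code == "NS":
--         return "INDIA"
--     elif code == "BO":
--         return "INDIA"
--     elif code == "SS":
--         return "CHINA"
--     elif code == "SZ":
--         return "CHINA"
--     elif code == "KS":
--         return "SOUTH KOREA"
--     elif code == "KQ":
--         return "SOUTH KOREA"
--     elif code == "TW":
--         return "TAIWAN"
--     elif code == "SI":
--         return "SINGAPORE"
--     else:
--         return None
--
--
-- def infer_country_from_symbol(symbol: str) -> str | None: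
--     s = symbol.upper()
--     dot = s.rfind(".")
--     if dot == -1:
--         return None
--     return _country_of_exchange(s[dot + 1:])
-- ===== Notes on version B (the rewrite author's own statement) =====
-- stated objective: alternative
-- what changed: A scans a 16-entry (dotted suffix, country) table testing endswith on each; B contains no table at all: it extracts the bare exchange code after the last dot once (rfind + slice, with a rfind==-1 guard for dot-less symbols) and maps it to a country by direct case dispatch on the code.
import Mathlib
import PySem

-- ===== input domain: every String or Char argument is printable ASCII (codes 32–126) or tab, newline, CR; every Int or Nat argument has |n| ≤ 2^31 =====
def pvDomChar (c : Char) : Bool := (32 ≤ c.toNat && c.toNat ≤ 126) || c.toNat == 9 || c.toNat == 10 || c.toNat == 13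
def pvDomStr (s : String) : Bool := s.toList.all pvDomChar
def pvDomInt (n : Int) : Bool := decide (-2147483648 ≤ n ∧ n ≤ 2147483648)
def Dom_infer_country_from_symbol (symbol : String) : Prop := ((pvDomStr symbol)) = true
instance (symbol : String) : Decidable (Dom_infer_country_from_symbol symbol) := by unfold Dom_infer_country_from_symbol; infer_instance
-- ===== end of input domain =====

-- B drops A's endswith scan over a dotted-suffix table: it extracts the bare exchange
-- code after the last dot once and dispatches on it directly; objective: alternative.

-- ===== PORT A =====
-- A's suffix_map literal
def suffixMapA : List (String × String) :=
  [(".T", "JAPAN"), (".HK", "HONG KONG"), (".L", "UNITED KINGDOM"), (".PA", "FRANCE"),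
   (".F", "GERMANY"), (".DE", "GERMANY"), (".TO", "CANADA"), (".AX", "AUSTRALIA"),
   (".NS", "INDIA"), (".BO", "INDIA"), (".SS", "CHINA"), (".SZ", "CHINA"),
   (".KS", "SOUTH KOREA"), (".KQ", "SOUTH KOREA"), (".TW", "TAIWAN"), (".SI", "SINGAPORE")]

-- A's for-loop with early return
def loopA (symbolUpper : String) : List (String × String) → Option String
  | [] => none
  | (suffix, country) :: rest =>
      if PySem.Str.endswith symbolUpper suffix then some country else loopA symbolUpper rest

def infer_country_from_symbol (symbol : String) : Option String :=
  loopA (PySem.Str.upper symbol) suffixMapA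

-- ===== PORT B =====
-- B's helper: direct case dispatch on the bare (dot-free, uppercased) exchange code
def countryOfExchange (code : String) : Option String :=
  if code == "T" then some "JAPAN"
  else if code == "HK" then some "HONG KONG"
  else if code == "L" then some "UNITED KINGDOM"
  else if code == "PA" then some "FRANCE"
  else if code == "F" then some "GERMANY"
  else if code == "DE" then some "GERMANY"
  else if code == "TO" then some "CANADA"
  else if code == "AX" then some "AUSTRALIA"
  else if code == "NS" then some "INDIA"
  else if code == "BO" then some "INDIA"
  else if code == "SS" then some "CHINA"
  else if code == "SZ" then some "CHINA"
  else if code == "KS" then some "SOUTH KOREA"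
  else if code == "KQ" then some "SOUTH KOREA"
  else if code == "TW" then some "TAIWAN"
  else if code == "SI" then some "SINGAPORE"
  else none

def infer_country_from_symbol_alt (symbol : String) : Option String :=
  let s := PySem.Str.upper symbol
  let dot := PySem.Str.rfind s "."
  if dot == -1 then none
  else countryOfExchange (PySem.Str.slice s (some (dot + 1)) none)

-- ===== PRECONDITION & SPEC =====
def Spec_infer_country_from_symbol (symbol : String) (out : Option String) : Prop := out = infer_country_from_symbol_alt symbol
instance (symbol : String) (out : Option String) : Decidable (Spec_infer_country_from_symbol symbol out) := by unfold Spec_infer_country_from_symbol; infer_instance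

-- ===== CLAIM (what is proved, stated in full; the proofs are below) =====
def Claim_equal_infer_country_from_symbol : Prop := ∀ (symbol : String), Dom_infer_country_from_symbol symbol → Spec_infer_country_from_symbol symbol (infer_country_from_symbol symbol)

-- ===== LEMMAS AND PROOFS =====

-- first-occurrence split of a list at an element
theorem first_split {α : Type} (a : α) (l : List α) (h : a ∈ l) :
    ∃ p q, l = p ++ a :: q ∧ a ∉ p := by
  induction l with
  | nil => cases h
  | cons x xs ih =>
      by_cases hx : x = a
      · exact ⟨[], xs, by simp [hx], by simp⟩
      · have h' : a ∈ xs := by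
          rcases List.mem_cons.mp h with h1 | h1
          · exact absurd h1.symm hx
          · exact h1
        rcases ih h' with ⟨p, q, hpq, hnp⟩
        exact ⟨x :: p, q, by simp [hpq], by simp [hnp]; exact fun h' => hx h'.symm⟩

-- uniqueness of the first-occurrence split
theorem first_split_unique {α : Type} (a : α) :
    ∀ (p₁ p₂ q₁ q₂ : List α), p₁ ++ a :: q₁ = p₂ ++ a :: q₂ → a ∉ p₁ → a ∉ p₂ →
      p₁ = p₂ ∧ q₁ = q₂ := by
  intro p₁
  induction p₁ with
  | nil =>
      intro p₂ q₁ q₂ h h₁ h₂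
      cases p₂ with
      | nil => simpa using h
      | cons y ys =>
          simp at h
          exact absurd (h.1 ▸ List.mem_cons_self) h₂
  | cons x xs ih =>
      intro p₂ q₁ q₂ h h₁ h₂
      cases p₂ with
      | nil =>
          simp at h
          exact absurd (h.1 ▸ List.mem_cons_self) h₁
      | cons y ys =>
          simp at h
          rcases ih ys q₁ q₂ h.2 (fun hm => h₁ (List.mem_cons_of_mem _ hm))
            (fun hm => h₂ (List.mem_cons_of_mem _ hm)) with ⟨hp, hq⟩
          exact ⟨by simp [h.1, hp], hq⟩

-- split a list at its LAST dot
theorem last_dot_split (l : List Char) (h : '.' ∈ l) :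
    ∃ l₁ l₂, l = l₁ ++ '.' :: l₂ ∧ '.' ∉ l₂ := by
  rcases first_split '.' l.reverse (by simpa using h) with ⟨p, q, hpq, hnp⟩
  refine ⟨q.reverse, p.reverse, ?_, by simpa using hnp⟩
  have := congrArg List.reverse hpq
  simpa using this

-- a dotted suffix matches iff its tail is exactly the part after the last dot
theorem endswith_char (l₁ l₂ t : List Char) (h₂ : '.' ∉ l₂) (ht : '.' ∉ t) :
    ('.' :: t <:+ l₁ ++ '.' :: l₂) ↔ l₂ = t := by
  constructor
  · rintro ⟨pre, hpre⟩
    have hrev : l₂.reverse ++ '.' :: l₁.reverse = t.reverse ++ '.' :: pre.reverse := by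
      have := congrArg List.reverse hpre
      simpa using this.symm
    have h1 := (first_split_unique '.' l₂.reverse t.reverse l₁.reverse pre.reverse hrev
      (by simpa using h₂) (by simpa using ht)).1
    simpa using congrArg List.reverse h1
  · rintro rfl
    exact ⟨l₁, rfl⟩

-- rfind.go returns -1 when there is no dot
theorem rfind_go_none (l : List Char) (h : '.' ∉ l) :
    ∀ i, PySem.Chars.rfind.go l ['.'] i = -1 := by
  intro i
  induction i with
  | zero =>
      simp only [PySem.Chars.rfind.go]
      cases l with
      | nil => simp [List.isPrefixOf]
      | cons c cs =>
          have hc : ('.' == c) = false := by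
            simp only [beq_eq_false_iff_ne]
            intro hc; exact h (hc ▸ List.mem_cons_self)
          simp [List.isPrefixOf, hc]
  | succ j ih =>
      simp only [PySem.Chars.rfind.go]
      cases hd : List.drop (j + 1) l with
      | nil => simpa [hd, List.isPrefixOf] using ih
      | cons c cs =>
          have hc : ('.' == c) = false := by
            simp only [beq_eq_false_iff_ne]
            intro hc
            refine h (List.mem_of_mem_drop (l := l) (i := j + 1) ?_)
            rw [hd, ← hc]
            exact List.mem_cons_self
          simpa [hd, List.isPrefixOf, hc] using ih

-- rfind.go finds the last dot
theorem rfind_go_last (l₁ l₂ : List Char) (h₂ : '.' ∉ l₂) :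
    ∀ k, PySem.Chars.rfind.go (l₁ ++ '.' :: l₂) ['.'] (l₁.length + k) = (l₁.length : Int) := by
  intro k
  induction k with
  | zero =>
      have hdrop : (l₁ ++ '.' :: l₂).drop l₁.length = '.' :: l₂ := by
        rw [List.drop_append, Nat.sub_self, List.drop_length, List.drop_zero, List.nil_append]
      cases hl : l₁.length with
      | zero =>
          have h1 : l₁ = [] := List.length_eq_zero_iff.mp hl
          subst h1
          simp [PySem.Chars.rfind.go, List.isPrefixOf]
      | succ j =>
          have : PySem.Chars.rfind.go (l₁ ++ '.' :: l₂) ['.'] (j + 1) = ((j + 1 : Nat) : Int) := by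
            simp only [PySem.Chars.rfind.go]
            rw [← hl, hdrop]
            simp [List.isPrefixOf]
          simpa only [Nat.add_zero] using this
  | succ k ih =>
      have hdrop : (l₁ ++ '.' :: l₂).drop (l₁.length + k + 1) = l₂.drop k := by
        rw [List.drop_append, show l₁.length + k + 1 - l₁.length = k + 1 by omega,
            List.drop_eq_nil_of_le (by omega), List.drop_succ_cons, List.nil_append]
      have hpre : List.isPrefixOf ['.'] (l₂.drop k) = false := by
        cases hd : l₂.drop k with
        | nil => simp [List.isPrefixOf]
        | cons c cs =>
            have hc : ('.' == c) = false := by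
              simp only [beq_eq_false_iff_ne]
              intro hc
              refine h₂ (List.mem_of_mem_drop (l := l₂) (i := k) ?_)
              rw [hd, ← hc]
              exact List.mem_cons_self
            simp [List.isPrefixOf, hc]
      show PySem.Chars.rfind.go (l₁ ++ '.' :: l₂) ['.'] ((l₁.length + k) + 1) = _
      simp only [PySem.Chars.rfind.go, hdrop, hpre]
      simpa using ih

-- the A-side loop returns none when no suffix matches
theorem loopA_none (u : String) :
    ∀ m : List (String × String), (∀ p ∈ m, PySem.Str.endswith u p.1 = false) →
      loopA u m = none := by
  intro m
  induction m with
  | nil => intro _; rfl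
  | cons p rest ih =>
      intro h
      obtain ⟨suf, c⟩ := p
      simp only [loopA, h (suf, c) List.mem_cons_self]
      exact ih (fun q hq => h q (List.mem_cons_of_mem _ hq))

-- one map entry: the dotted suffix matches iff the bare after-last-dot code equals its tail
theorem entry_fact (u code suf bare : String) (l₁ l₂ t : List Char)
    (hu : u.toList = l₁ ++ '.' :: l₂) (h₂ : '.' ∉ l₂) (hk : code.toList = l₂)
    (hs : suf.toList = '.' :: t) (hb : bare.toList = t) (ht : '.' ∉ t) :
    PySem.Str.endswith u suf = (code == bare) := by
  rw [Bool.eq_iff_iff]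
  rw [PySem.Str.endswith_eq, PySem.Chars.endswith_iff, hu, hs, beq_iff_eq]
  rw [String.ext_iff, hk, hb]
  exact endswith_char l₁ l₂ t h₂ ht

-- a suffix containing a dot never matches a dot-free string
theorem entry_false (u suf : String) (hnd : '.' ∉ u.toList) (hds : '.' ∈ suf.toList) :
    PySem.Str.endswith u suf = false := by
  rw [PySem.Str.endswith_eq]
  cases he : PySem.Chars.endswith u.toList suf.toList with
  | false => rfl
  | true =>
      rcases (PySem.Chars.endswith_iff _ _).mp he with ⟨pre, hpre⟩
      exact absurd (hpre ▸ List.mem_append_right pre hds) hnd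

-- ===== VERDICT (by name: the statement is the Claim_ definition above) =====
theorem infer_country_from_symbol_spec : Claim_equal_infer_country_from_symbol := by
  intro symbol _
  unfold Spec_infer_country_from_symbol
  show loopA (PySem.Str.upper symbol) suffixMapA = _
  simp only [infer_country_from_symbol_alt]
  by_cases hdot : '.' ∈ (PySem.Str.upper symbol).toList
  · rcases last_dot_split _ hdot with ⟨l₁, l₂, hsplit, h₂⟩
    have hlen : (PySem.Str.upper symbol).toList.length = l₁.length + (l₂.length + 1) := by
      rw [hsplit]; simp
    have hr : PySem.Str.rfind (PySem.Str.upper symbol) "." = (l₁.length : Int) := by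
      rw [PySem.Str.rfind_eq]
      show PySem.Chars.rfind (PySem.Str.upper symbol).toList ['.'] = _
      unfold PySem.Chars.rfind
      rw [hlen, hsplit]
      exact rfind_go_last l₁ l₂ h₂ (l₂.length + 1)
    have hne : (((l₁.length : Int)) == -1) = false := by
      simp only [beq_eq_false_iff_ne]
      omega
    have hcast : ((l₁.length : Int) + 1) = ((l₁.length + 1 : Nat) : Int) := by push_cast; ring
    have hk : (PySem.Str.slice (PySem.Str.upper symbol) (some ((l₁.length : Int) + 1)) none).toList
        = l₂ := by
      rw [PySem.Str.toList_slice, PySem.Chars.slice_eq_listSlice, hcast,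
          PySem.List.slice_from_natCast, hsplit, List.drop_append,
          show l₁.length + 1 - l₁.length = 1 by omega,
          List.drop_eq_nil_of_le (by omega), List.drop_succ_cons, List.drop_zero,
          List.nil_append]
    rw [hr]
    simp only [hne, Bool.false_eq_true, if_false]
    set code := PySem.Str.slice (PySem.Str.upper symbol) (some ((l₁.length : Int) + 1)) none with hc
    have e1 := entry_fact _ code ".T" "T" l₁ l₂ ['T'] hsplit h₂ hk rfl rfl (by decide)
    have e2 := entry_fact _ code ".HK" "HK" l₁ l₂ ['H','K'] hsplit h₂ hk rfl rfl (by decide)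
    have e3 := entry_fact _ code ".L" "L" l₁ l₂ ['L'] hsplit h₂ hk rfl rfl (by decide)
    have e4 := entry_fact _ code ".PA" "PA" l₁ l₂ ['P','A'] hsplit h₂ hk rfl rfl (by decide)
    have e5 := entry_fact _ code ".F" "F" l₁ l₂ ['F'] hsplit h₂ hk rfl rfl (by decide)
    have e6 := entry_fact _ code ".DE" "DE" l₁ l₂ ['D','E'] hsplit h₂ hk rfl rfl (by decide)
    have e7 := entry_fact _ code ".TO" "TO" l₁ l₂ ['T','O'] hsplit h₂ hk rfl rfl (by decide)
    have e8 := entry_fact _ code ".AX" "AX" l₁ l₂ ['A','X'] hsplit h₂ hk rfl rfl (by decide)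
    have e9 := entry_fact _ code ".NS" "NS" l₁ l₂ ['N','S'] hsplit h₂ hk rfl rfl (by decide)
    have e10 := entry_fact _ code ".BO" "BO" l₁ l₂ ['B','O'] hsplit h₂ hk rfl rfl (by decide)
    have e11 := entry_fact _ code ".SS" "SS" l₁ l₂ ['S','S'] hsplit h₂ hk rfl rfl (by decide)
    have e12 := entry_fact _ code ".SZ" "SZ" l₁ l₂ ['S','Z'] hsplit h₂ hk rfl rfl (by decide)
    have e13 := entry_fact _ code ".KS" "KS" l₁ l₂ ['K','S'] hsplit h₂ hk rfl rfl (by decide)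
    have e14 := entry_fact _ code ".KQ" "KQ" l₁ l₂ ['K','Q'] hsplit h₂ hk rfl rfl (by decide)
    have e15 := entry_fact _ code ".TW" "TW" l₁ l₂ ['T','W'] hsplit h₂ hk rfl rfl (by decide)
    have e16 := entry_fact _ code ".SI" "SI" l₁ l₂ ['S','I'] hsplit h₂ hk rfl rfl (by decide)
    simp only [suffixMapA, loopA, countryOfExchange,
      e1, e2, e3, e4, e5, e6, e7, e8, e9, e10, e11, e12, e13, e14, e15, e16]
  · have hr : PySem.Str.rfind (PySem.Str.upper symbol) "." = -1 := by
      rw [PySem.Str.rfind_eq]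
      show PySem.Chars.rfind (PySem.Str.upper symbol).toList ['.'] = _
      unfold PySem.Chars.rfind
      exact rfind_go_none _ hdot _
    rw [hr]
    simp only [BEq.rfl, if_true]
    apply loopA_none
    intro p hp
    fin_cases hp <;> exact entry_false _ _ hdot (by decide)
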